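-- pv_equiv track=rewrite | github.com/iakov1992/gsc_ml_model | commonCode.py | getRebin
-- ===== SOURCE A (Python) =====
-- def getRebin(variableLengths, bins):
--   if len(variableLengths) == 1:
--     return bins[0]
--
--   nBins = len(variableLengths)
--   #tmpBin = bins[nBins-1]*variableLengths[nBins-2] + bins[nBins-2]
--   tmpBin = bins[nBins-2]*variableLengths[nBins-1] + bins[nBins-1]
--   bins[nBins-2] = tmpBin
--   variableLengths[nBins-2] = variableLengths[nBins-1] * variableLengths[nBins-2]
--
--   variableLengths.pop(nBins-1)
--   bins.pop(nBins-1)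
--
--   return getRebin(variableLengths, bins)
-- ===== SOURCE B (Python) =====
-- def getRebin(variableLengths, bins):
--     result = bins[0]
--     for length, b in zip(variableLengths[1:], bins[1:]):
--         result = result * length + b
--     return result
-- ===== Notes on version B (the rewrite author's own statement) =====
-- stated objective: simpler
-- what changed: Replaces A's tail recursion that repeatedly mutates and pops the back of both lists by a single non-mutating forward Horner fold over the zipped tails (no Python recursion-frame or per-step list-rewrite overhead); B does not mutate its arguments (the equivalence is about the return value).
import Mathlib
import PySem

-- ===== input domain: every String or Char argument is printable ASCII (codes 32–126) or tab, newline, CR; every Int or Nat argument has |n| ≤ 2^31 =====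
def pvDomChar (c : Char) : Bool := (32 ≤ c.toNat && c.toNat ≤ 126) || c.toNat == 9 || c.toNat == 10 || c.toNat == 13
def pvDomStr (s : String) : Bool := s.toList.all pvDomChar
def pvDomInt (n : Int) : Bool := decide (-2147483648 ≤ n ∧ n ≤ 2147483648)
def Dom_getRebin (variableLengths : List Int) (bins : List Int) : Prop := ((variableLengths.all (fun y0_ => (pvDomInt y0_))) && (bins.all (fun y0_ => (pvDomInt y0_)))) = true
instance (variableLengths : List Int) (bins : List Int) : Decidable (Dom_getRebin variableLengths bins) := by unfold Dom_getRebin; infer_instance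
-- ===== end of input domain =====

-- B replaces A's back-collapsing recursion by one forward Horner fold; B does not mutate its
-- arguments (A pops/overwrites both lists in place), so the equivalence is about the return value.

-- ===== PORT A =====
-- fuel = the recursion depth (the length of variableLengths); under Pre_ the fuel never runs out.
def getRebinAux : Nat → List Int → List Int → Int
  | 0, _, bins => (PySem.List.pyGet? bins 0).getD 0
  | fuel + 1, variableLengths, bins =>
    if variableLengths.length = 1 then
      (PySem.List.pyGet? bins 0).getD 0
    else
      let nBins := variableLengths.length
      let tmpBin := (PySem.List.pyGet? bins ((nBins : Int) - 2)).getD 0 *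
                    (PySem.List.pyGet? variableLengths ((nBins : Int) - 1)).getD 0 +
                    (PySem.List.pyGet? bins ((nBins : Int) - 1)).getD 0
      let bins1 := bins.set (nBins - 2) tmpBin
      let vl1 := variableLengths.set (nBins - 2)
                   ((PySem.List.pyGet? variableLengths ((nBins : Int) - 1)).getD 0 *
                    (PySem.List.pyGet? variableLengths ((nBins : Int) - 2)).getD 0)
      -- variableLengths.pop(nBins-1); bins.pop(nBins-1)
      getRebinAux fuel (vl1.eraseIdx (nBins - 1)) (bins1.eraseIdx (nBins - 1))

def getRebin (variableLengths : List Int) (bins : List Int) : Int :=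
  getRebinAux variableLengths.length variableLengths bins

-- ===== PORT B =====
def getRebin_alt (variableLengths : List Int) (bins : List Int) : Int :=
  ((PySem.List.slice variableLengths (some 1) none).zip
    (PySem.List.slice bins (some 1) none)).foldl
    (fun result lb => result * lb.1 + lb.2)
    ((PySem.List.pyGet? bins 0).getD 0)

-- ===== PRECONDITION & SPEC =====
-- Pre_ = exactly the inputs where the Python A returns (no IndexError): it needs bins[0..n-1]
-- for n = len(variableLengths) ≥ 1.
def Pre_getRebin (variableLengths : List Int) (bins : List Int) : Prop :=
  1 ≤ variableLengths.length ∧ variableLengths.length ≤ bins.length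
instance (variableLengths : List Int) (bins : List Int) : Decidable (Pre_getRebin variableLengths bins) := by unfold Pre_getRebin; infer_instance

def pvWitness_getRebin : List Int × List Int := ([2, 3, 4], [1, 2, 3])

def Spec_getRebin (variableLengths : List Int) (bins : List Int) (out : Int) : Prop := out = getRebin_alt variableLengths bins
instance (variableLengths : List Int) (bins : List Int) (out : Int) : Decidable (Spec_getRebin variableLengths bins out) := by unfold Spec_getRebin; infer_instance

-- ===== CLAIM (what is proved, stated in full; the proofs are below) =====
def Claim_equal_getRebin : Prop := ∀ (variableLengths : List Int) (bins : List Int), Dom_getRebin variableLengths bins → Pre_getRebin variableLengths bins → Spec_getRebin variableLengths bins (getRebin variableLengths bins)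

-- ===== LEMMAS AND PROOFS =====

lemma exists_two_last (vl : List Int) (h : 2 ≤ vl.length) :
    ∃ l x y, vl = l ++ [x, y] := by
  induction vl with
  | nil => simp at h
  | cons a t ih =>
    rcases t with _ | ⟨b, t'⟩
    · simp at h
    · rcases t' with _ | ⟨c, t''⟩
      · exact ⟨[], a, b, rfl⟩
      · obtain ⟨l, x, y, hl⟩ := ih (by simp)
        exact ⟨a :: l, x, y, by rw [hl]; rfl⟩

-- B's value is unchanged by one collapse step of A.
lemma key_step (l : List Int) (x y : Int) (c : List Int) (u v : Int) (r : List Int)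
    (h : c.length = l.length) :
    getRebin_alt (l ++ [y * x]) (c ++ (u * y + v) :: r) =
      getRebin_alt (l ++ [x, y]) (c ++ u :: v :: r) := by
  rcases l with _ | ⟨l0, lt⟩
  · rcases c with _ | ⟨c0, ct⟩
    · simp [getRebin_alt, PySem.List.slice_from_one, PySem.List.pyGet?_zero_cons]
    · simp at h
  · rcases c with _ | ⟨c0, ct⟩
    · simp at h
    · simp only [List.length_cons, Nat.succ_inj] at h
      simp only [getRebin_alt, PySem.List.slice_from_one, List.cons_append, List.tail_cons,
        PySem.List.pyGet?_zero_cons, Option.getD_some]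
      have h2 : (lt ++ [y * x]).zip (ct ++ (u * y + v) :: r) =
          lt.zip ct ++ [(y * x, u * y + v)] := by
        rw [List.zip_append h.symm]; rfl
      have h3 : (lt ++ [x, y]).zip (ct ++ u :: v :: r) =
          lt.zip ct ++ [(x, u), (y, v)] := by
        rw [List.zip_append h.symm]; rfl
      rw [h2, h3, List.foldl_append, List.foldl_append]
      simp [List.foldl]
      ring

lemma aux_eq (fuel : Nat) : ∀ (vl bins : List Int), vl.length = fuel →
    1 ≤ vl.length → vl.length ≤ bins.length →
    getRebinAux fuel vl bins = getRebin_alt vl bins := by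
  induction fuel with
  | zero => intro vl bins hf h1 _; omega
  | succ k ih =>
    intro vl bins hf h1 h2
    by_cases hone : vl.length = 1
    · -- base case: vl = [x], bins = b :: bs
      rcases vl with _ | ⟨x, t⟩
      · simp at hone
      · simp only [List.length_cons, Nat.succ_inj] at hone
        have ht : t = [] := List.eq_nil_of_length_eq_zero hone
        subst ht
        rcases bins with _ | ⟨b, bs⟩
        · simp at h2
        · simp [getRebinAux, getRebin_alt, PySem.List.slice_from_one]
    · have hn2 : 2 ≤ vl.length := by omega
      obtain ⟨l, x, y, hvl⟩ := exists_two_last vl hn2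
      have hcl : vl.length = l.length + 2 := by simp [hvl]
      -- bins = c ++ u :: v :: r with c.length = l.length
      have hbl : l.length + 2 ≤ bins.length := by omega
      obtain ⟨c, rest, hbins, hclen⟩ :
          ∃ c rest, bins = c ++ rest ∧ c.length = l.length :=
        ⟨bins.take l.length, bins.drop l.length, (List.take_append_drop _ _).symm,
          List.length_take_of_le (by omega)⟩
      have hrest2 : 2 ≤ rest.length := by
        have : bins.length = c.length + rest.length := by simp [hbins]
        omega
      obtain ⟨u, v, r, hrest⟩ : ∃ u v r, rest = u :: v :: r := by
        rcases rest with _ | ⟨u, t⟩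
        · simp at hrest2
        · rcases t with _ | ⟨v, r⟩
          · simp at hrest2
          · exact ⟨u, v, r, rfl⟩
      subst hrest; subst hvl; subst hbins
      -- evaluate one step of A
      rw [getRebinAux]
      simp only [if_neg hone]
      have hget_y : (PySem.List.pyGet? (l ++ [x, y]) (((l ++ [x, y]).length : Int) - 1)).getD 0 = y := by
        have : ((l ++ [x, y]).length : Int) - 1 = ((l.length + 1 : Nat) : Int) := by
          simp only [List.length_append, List.length_cons, List.length_nil]; push_cast; ring
        rw [this, PySem.List.pyGet?_natCast]
        simp
      have hget_x : (PySem.List.pyGet? (l ++ [x, y]) (((l ++ [x, y]).length : Int) - 2)).getD 0 = x := by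
        have : ((l ++ [x, y]).length : Int) - 2 = ((l.length : Nat) : Int) := by
          simp only [List.length_append, List.length_cons, List.length_nil]; push_cast; ring
        rw [this, PySem.List.pyGet?_natCast]
        simp
      have hget_u : (PySem.List.pyGet? (c ++ u :: v :: r) (((l ++ [x, y]).length : Int) - 2)).getD 0 = u := by
        have : ((l ++ [x, y]).length : Int) - 2 = ((c.length : Nat) : Int) := by
          simp only [List.length_append, List.length_cons, List.length_nil, hclen]; push_cast; ring
        rw [this, PySem.List.pyGet?_natCast]
        simp
      have hget_v : (PySem.List.pyGet? (c ++ u :: v :: r) (((l ++ [x, y]).length : Int) - 1)).getD 0 = v := by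
        have : ((l ++ [x, y]).length : Int) - 1 = ((c.length + 1 : Nat) : Int) := by
          simp only [List.length_append, List.length_cons, List.length_nil, hclen]; push_cast; ring
        rw [this, PySem.List.pyGet?_natCast]
        simp
      rw [hget_y, hget_x, hget_u, hget_v]
      have hidx2 : (l ++ [x, y]).length - 2 = l.length := by simp
      have hidx1 : (l ++ [x, y]).length - 1 = l.length + 1 := by simp
      rw [hidx2, hidx1]
      have hsetb : (c ++ u :: v :: r).set l.length (u * y + v) =
          c ++ (u * y + v) :: v :: r := by
        rw [← hclen, List.set_append_right _ _ (le_refl _)]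
        simp
      have hsetv : (l ++ [x, y]).set l.length (y * x) = l ++ [y * x, y] := by
        rw [List.set_append_right _ _ (le_refl _)]
        simp
      have herasb : (c ++ (u * y + v) :: v :: r).eraseIdx (l.length + 1) =
          c ++ (u * y + v) :: r := by
        rw [← hclen]
        rw [List.eraseIdx_append_of_length_le (by simp)]
        simp
      have herasv : (l ++ [y * x, y]).eraseIdx (l.length + 1) = l ++ [y * x] := by
        rw [List.eraseIdx_append_of_length_le (by simp)]
        simp
      rw [hsetb, hsetv, herasb, herasv]
      rw [ih (l ++ [y * x]) (c ++ (u * y + v) :: r) (by simp; omega) (by simp) (by simp; omega)]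
      exact key_step l x y c u v r hclen

-- ===== VERDICT (by name: the statement is the Claim_ definition above) =====
theorem getRebin_spec : Claim_equal_getRebin := by
  intro vl bins _ hpre
  unfold Spec_getRebin getRebin
  exact aux_eq vl.length vl bins rfl hpre.1 hpre.2
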